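-- pv_equiv track=rewrite | github.com/JanLMoffett/PlayByPlayMiner | PlayByPlayMiner1/Old Files/scrape8.py | was_subbed
-- ===== SOURCE A (Python) =====
-- pos = ["dh","p","c","1b","2b","3b","ss","lf","cf","rf"]
--
-- def was_subbed(sub_list):#~~~~~~~~~~~~~~~~~~~~~~~~~~~~~~~~~~~~~~~~~~~~~~~~~~~~~
--     subbed = [False]*10
--
--     for i,p in enumerate(pos):
--         for j,s in enumerate(sub_list):
--             if s[s.rfind(" ")+1:s.rfind(" ")+3] == p:
--                 subbed[i] = True
--                 break
--
--     return subbed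
-- ===== SOURCE B (Python) =====
-- pos = ["dh", "p", "c", "1b", "2b", "3b", "ss", "lf", "cf", "rf"]
-- POS_IDX = {p: i for i, p in enumerate(pos)}
--
-- def was_subbed(sub_list):
--     subbed = [False] * 10
--     for s in sub_list:
--         r = s.rfind(" ")
--         i = POS_IDX.get(s[r + 1:r + 3])
--         if i is not None:
--             subbed[i] = True
--     return subbed
-- ===== Notes on version B (the rewrite author's own statement) =====
-- stated objective: faster
-- what changed: A rescans sub_list once per each of the 10 position codes (nested position-by-position loops with break); B builds a code-to-index dict once and makes a single pass over sub_list, setting the flag for each sub's code directly.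
import Mathlib
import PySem

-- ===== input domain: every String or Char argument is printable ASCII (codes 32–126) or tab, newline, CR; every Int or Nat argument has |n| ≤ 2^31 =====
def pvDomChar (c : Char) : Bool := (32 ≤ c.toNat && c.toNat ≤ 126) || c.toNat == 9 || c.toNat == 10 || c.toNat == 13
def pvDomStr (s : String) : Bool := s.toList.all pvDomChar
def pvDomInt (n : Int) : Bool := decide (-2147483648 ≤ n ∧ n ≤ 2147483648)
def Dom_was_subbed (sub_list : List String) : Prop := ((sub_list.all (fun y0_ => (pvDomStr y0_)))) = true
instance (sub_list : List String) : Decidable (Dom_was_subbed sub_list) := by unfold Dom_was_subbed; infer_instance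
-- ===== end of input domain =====

-- B replaces A's 10×n nested rescan (one pass over sub_list per position) by a
-- position→index table and a single pass over sub_list; return value only, no mutation observable.

-- the module-level constant pos
def pvPos : List String := ["dh", "p", "c", "1b", "2b", "3b", "ss", "lf", "cf", "rf"]

-- s[s.rfind(" ")+1 : s.rfind(" ")+3], the code both Pythons extract from a sub string
def pvCode (s : String) : List Char :=
  PySem.List.slice s.toList (some (PySem.Str.rfind s " " + 1)) (some (PySem.Str.rfind s " " + 3))

-- ===== PORT A =====
-- inner 'for j,s in enumerate(sub_list)' loop: set subbed[i] and break on first match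
def pvInnerA (i : Int) (p : String) (subbed : List Bool) : List String → List Bool
  | [] => subbed
  | s :: rest =>
      if pvCode s = p.toList then PySem.List.pySetD subbed i true
      else pvInnerA i p subbed rest

def was_subbed (sub_list : List String) : List Bool :=
  (PySem.List.enumerate pvPos 0).foldl
    (fun subbed ip => pvInnerA ip.1 ip.2 subbed sub_list)
    (List.replicate 10 false)

-- ===== PORT B =====
-- POS_IDX = {p: i for i, p in enumerate(pos)}
def pvPosIdx : PySem.Dict (List Char) Int :=
  (PySem.List.enumerate pvPos 0).foldl (fun d ip => d.insert ip.2.toList ip.1) PySem.Dict.empty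

def was_subbed_alt (sub_list : List String) : List Bool :=
  sub_list.foldl
    (fun subbed s =>
      match pvPosIdx.get? (pvCode s) with
      | some i => PySem.List.pySetD subbed i true
      | none => subbed)
    (List.replicate 10 false)

-- ===== PRECONDITION & SPEC =====
def Spec_was_subbed (sub_list : List String) (out : List Bool) : Prop := out = was_subbed_alt sub_list
instance (sub_list : List String) (out : List Bool) : Decidable (Spec_was_subbed sub_list out) := by unfold Spec_was_subbed; infer_instance

-- ===== CLAIM (what is proved, stated in full; the proofs are below) =====
def Claim_equal_was_subbed : Prop := ∀ (sub_list : List String), Dom_was_subbed sub_list → Spec_was_subbed sub_list (was_subbed sub_list)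

-- ===== LEMMAS AND PROOFS =====

-- whether some sub in l carries code p
def pvHit (p : List Char) (l : List String) : Bool := l.any (fun s => pvCode s == p)

theorem pvInnerA_eq (i : Int) (p : String) (subbed : List Bool) (l : List String) :
    pvInnerA i p subbed l =
      if pvHit p.toList l then PySem.List.pySetD subbed i true else subbed := by
  induction l with
  | nil => simp [pvInnerA, pvHit]
  | cons s rest ih =>
      by_cases h : pvCode s = p.toList
      · simp [pvInnerA, pvHit, h]
      · simp only [pvInnerA, pvHit, List.any_cons, if_neg h, ih, pvHit]
        simp [h]

theorem pvA_char (l : List String) :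
    was_subbed l = pvPos.map (fun p => pvHit p.toList l) := by
  unfold was_subbed
  simp only [pvPos, PySem.List.enumerate_cons, PySem.List.enumerate_nil, List.foldl_cons,
    List.foldl_nil, pvInnerA_eq, List.map]
  generalize pvHit "dh".toList l = c0
  generalize pvHit "p".toList l = c1
  generalize pvHit "c".toList l = c2
  generalize pvHit "1b".toList l = c3
  generalize pvHit "2b".toList l = c4
  generalize pvHit "3b".toList l = c5
  generalize pvHit "ss".toList l = c6
  generalize pvHit "lf".toList l = c7
  generalize pvHit "cf".toList l = c8
  generalize pvHit "rf".toList l = c9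
  revert c0 c1 c2 c3 c4 c5 c6 c7 c8 c9
  decide

theorem pvPosIdx_eq : pvPosIdx = PySem.Dict.mk
    [("dh".toList, 0), ("p".toList, 1), ("c".toList, 2), ("1b".toList, 3),
     ("2b".toList, 4), ("3b".toList, 5), ("ss".toList, 6), ("lf".toList, 7),
     ("cf".toList, 8), ("rf".toList, 9)] := rfl

theorem pvSet0 (b0 b1 b2 b3 b4 b5 b6 b7 b8 b9 : Bool) :
    PySem.List.pySetD [b0,b1,b2,b3,b4,b5,b6,b7,b8,b9] (0 : Int) true = [true, b1, b2, b3, b4, b5, b6, b7, b8, b9] := rfl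
theorem pvSet1 (b0 b1 b2 b3 b4 b5 b6 b7 b8 b9 : Bool) :
    PySem.List.pySetD [b0,b1,b2,b3,b4,b5,b6,b7,b8,b9] (1 : Int) true = [b0, true, b2, b3, b4, b5, b6, b7, b8, b9] := rfl
theorem pvSet2 (b0 b1 b2 b3 b4 b5 b6 b7 b8 b9 : Bool) :
    PySem.List.pySetD [b0,b1,b2,b3,b4,b5,b6,b7,b8,b9] (2 : Int) true = [b0, b1, true, b3, b4, b5, b6, b7, b8, b9] := rfl
theorem pvSet3 (b0 b1 b2 b3 b4 b5 b6 b7 b8 b9 : Bool) :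
    PySem.List.pySetD [b0,b1,b2,b3,b4,b5,b6,b7,b8,b9] (3 : Int) true = [b0, b1, b2, true, b4, b5, b6, b7, b8, b9] := rfl
theorem pvSet4 (b0 b1 b2 b3 b4 b5 b6 b7 b8 b9 : Bool) :
    PySem.List.pySetD [b0,b1,b2,b3,b4,b5,b6,b7,b8,b9] (4 : Int) true = [b0, b1, b2, b3, true, b5, b6, b7, b8, b9] := rfl
theorem pvSet5 (b0 b1 b2 b3 b4 b5 b6 b7 b8 b9 : Bool) :
    PySem.List.pySetD [b0,b1,b2,b3,b4,b5,b6,b7,b8,b9] (5 : Int) true = [b0, b1, b2, b3, b4, true, b6, b7, b8, b9] := rfl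
theorem pvSet6 (b0 b1 b2 b3 b4 b5 b6 b7 b8 b9 : Bool) :
    PySem.List.pySetD [b0,b1,b2,b3,b4,b5,b6,b7,b8,b9] (6 : Int) true = [b0, b1, b2, b3, b4, b5, true, b7, b8, b9] := rfl
theorem pvSet7 (b0 b1 b2 b3 b4 b5 b6 b7 b8 b9 : Bool) :
    PySem.List.pySetD [b0,b1,b2,b3,b4,b5,b6,b7,b8,b9] (7 : Int) true = [b0, b1, b2, b3, b4, b5, b6, true, b8, b9] := rfl
theorem pvSet8 (b0 b1 b2 b3 b4 b5 b6 b7 b8 b9 : Bool) :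
    PySem.List.pySetD [b0,b1,b2,b3,b4,b5,b6,b7,b8,b9] (8 : Int) true = [b0, b1, b2, b3, b4, b5, b6, b7, true, b9] := rfl
theorem pvSet9 (b0 b1 b2 b3 b4 b5 b6 b7 b8 b9 : Bool) :
    PySem.List.pySetD [b0,b1,b2,b3,b4,b5,b6,b7,b8,b9] (9 : Int) true = [b0, b1, b2, b3, b4, b5, b6, b7, b8, true] := rfl

theorem pvStepB (s : String) (b0 b1 b2 b3 b4 b5 b6 b7 b8 b9 : Bool) :
    (match pvPosIdx.get? (pvCode s) with
     | some i => PySem.List.pySetD [b0,b1,b2,b3,b4,b5,b6,b7,b8,b9] i true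
     | none => [b0,b1,b2,b3,b4,b5,b6,b7,b8,b9]) =
    [b0 || (pvCode s == "dh".toList), b1 || (pvCode s == "p".toList), b2 || (pvCode s == "c".toList), b3 || (pvCode s == "1b".toList), b4 || (pvCode s == "2b".toList), b5 || (pvCode s == "3b".toList), b6 || (pvCode s == "ss".toList), b7 || (pvCode s == "lf".toList), b8 || (pvCode s == "cf".toList), b9 || (pvCode s == "rf".toList)] := by
  rw [pvPosIdx_eq]
  simp only [PySem.Dict.get?_mk_cons]
  by_cases h0 : pvCode s = ['d','h']
  · simp [h0, pvSet0]
  by_cases h1 : pvCode s = ['p']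
  · simp [h1, pvSet1]
  by_cases h2 : pvCode s = ['c']
  · simp [h2, pvSet2]
  by_cases h3 : pvCode s = ['1','b']
  · simp [h3, pvSet3]
  by_cases h4 : pvCode s = ['2','b']
  · simp [h4, pvSet4]
  by_cases h5 : pvCode s = ['3','b']
  · simp [h5, pvSet5]
  by_cases h6 : pvCode s = ['s','s']
  · simp [h6, pvSet6]
  by_cases h7 : pvCode s = ['l','f']
  · simp [h7, pvSet7]
  by_cases h8 : pvCode s = ['c','f']
  · simp [h8, pvSet8]
  by_cases h9 : pvCode s = ['r','f']
  · simp [h9, pvSet9]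
  · simp [PySem.Dict.get?, Ne.symm h0, Ne.symm h1, Ne.symm h2, Ne.symm h3, Ne.symm h4, Ne.symm h5, Ne.symm h6, Ne.symm h7, Ne.symm h8, Ne.symm h9, h0, h1, h2, h3, h4, h5, h6, h7, h8, h9]

theorem pvB_loop (l : List String) (b0 b1 b2 b3 b4 b5 b6 b7 b8 b9 : Bool) :
    l.foldl
      (fun subbed s =>
        match pvPosIdx.get? (pvCode s) with
        | some i => PySem.List.pySetD subbed i true
        | none => subbed)
      [b0,b1,b2,b3,b4,b5,b6,b7,b8,b9] = [b0 || pvHit "dh".toList l, b1 || pvHit "p".toList l, b2 || pvHit "c".toList l, b3 || pvHit "1b".toList l, b4 || pvHit "2b".toList l, b5 || pvHit "3b".toList l, b6 || pvHit "ss".toList l, b7 || pvHit "lf".toList l, b8 || pvHit "cf".toList l, b9 || pvHit "rf".toList l] := by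
  induction l generalizing b0 b1 b2 b3 b4 b5 b6 b7 b8 b9 with
  | nil => simp [pvHit]
  | cons s rest ih =>
      simp only [List.foldl_cons]
      rw [pvStepB, ih]
      simp [pvHit, Bool.or_assoc]

theorem pvB_char (l : List String) :
    was_subbed_alt l = pvPos.map (fun p => pvHit p.toList l) := by
  unfold was_subbed_alt
  have := pvB_loop l false false false false false false false false false false
  simpa [pvPos] using this

-- ===== VERDICT (by name: the statement is the Claim_ definition above) =====
theorem was_subbed_spec : Claim_equal_was_subbed := by
  intro l _
  unfold Spec_was_subbed
  rw [pvA_char, pvB_char]
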